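-- pv_equiv track=rewrite | github.com/remis87/aoc2019 | day22.py | build_inverse_polynomial
-- ===== SOURCE A (Python) =====
-- def build_inverse_polynomial(functions, N):
--     a, b = 1, 0
--     for f in functions[::-1]:
--         if f[0] == 0:
--             a *= -1
--             b = - 1 - b
--         elif f[0] == 1:
--             inv = pow(f[1], -1, N)
--             a = a * inv
--             b = b * inv
--         elif f[0] == 2:
--             b = b + f[1]
--     return a, b
-- ===== SOURCE B (Python) =====
-- def build_inverse_polynomial(functions, N):
--     def pair(f):
--         if f[0] == 0:
--             return (-1, -1)
--         if f[0] == 1: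
--             return (pow(f[1], -1, N), 0)
--         if f[0] == 2:
--             return (1, f[1])
--         return (1, 0)
--
--     def compose(p, q):
--         # p after q: x -> p[0]*(q[0]*x + q[1]) + p[1]
--         return (p[0] * q[0], p[0] * q[1] + p[1])
--
--     def go(ts):
--         if not ts:
--             return (1, 0)
--         if len(ts) == 1:
--             return ts[0]
--         m = len(ts) // 2
--         return compose(go(ts[:m]), go(ts[m:]))
--
--     return go([pair(f) for f in functions])
-- ===== Notes on version B (the rewrite author's own statement) =====
-- stated objective: alternative
-- what changed: B first maps every step to its inverse affine pair and then combines the pairs by balanced divide-and-conquer composition of affine maps, instead of A's single reversed-list loop rewriting (a,b) branch by branch.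
import Mathlib
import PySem

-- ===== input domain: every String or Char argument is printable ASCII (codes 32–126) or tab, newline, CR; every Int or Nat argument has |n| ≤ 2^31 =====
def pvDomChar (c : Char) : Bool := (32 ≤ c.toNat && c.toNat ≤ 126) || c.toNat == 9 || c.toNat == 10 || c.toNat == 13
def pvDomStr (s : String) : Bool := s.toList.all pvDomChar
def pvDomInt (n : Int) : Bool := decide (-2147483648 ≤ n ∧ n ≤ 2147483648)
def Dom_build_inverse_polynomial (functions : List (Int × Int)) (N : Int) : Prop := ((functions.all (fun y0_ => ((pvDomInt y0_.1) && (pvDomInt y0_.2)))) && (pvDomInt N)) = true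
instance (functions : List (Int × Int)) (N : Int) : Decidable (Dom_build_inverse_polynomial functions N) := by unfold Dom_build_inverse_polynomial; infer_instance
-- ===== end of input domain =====

-- B maps every step to an inverse affine pair first, then combines the pairs by balanced
-- divide-and-conquer composition, instead of A's reversed-list branch-by-branch loop
-- (objective: alternative; same result, no speed claim).

-- Python's pow(x, -1, N): modular inverse reduced with Python's sign-of-divisor mod.
-- Exact whenever gcd(x, N) = 1 and N ≠ 0 (the inputs Pre_ admits); Python raises elsewhere.
def pymodinv (x N : Int) : Int :=
  PySem.Int.mod (x.sign * (Nat.xgcd x.natAbs N.natAbs).1) N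

-- ===== PORT A =====
def build_inverse_polynomial (functions : List (Int × Int)) (N : Int) : Int × Int :=
  ((PySem.List.slice? functions none none (-1)).getD []).foldl
    (fun (p : Int × Int) f =>
      let a := p.1
      let b := p.2
      if f.1 == 0 then (a * (-1), -1 - b)
      else if f.1 == 1 then
        let inv := pymodinv f.2 N
        (a * inv, b * inv)
      else if f.1 == 2 then (a, b + f.2)
      else (a, b))
    (1, 0)

-- ===== PORT B =====
-- Source B's `pair`: the inverse affine pair contributed by one shuffle step.
def bPair (N : Int) (f : Int × Int) : Int × Int :=
  if f.1 == 0 then (-1, -1)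
  else if f.1 == 1 then (pymodinv f.2 N, 0)
  else if f.1 == 2 then (1, f.2)
  else (1, 0)

-- Source B's `compose`: p after q, x ↦ p.1*(q.1*x + q.2) + p.2.
def bCompose (p q : Int × Int) : Int × Int := (p.1 * q.1, p.1 * q.2 + p.2)

-- Source B's `go`: balanced divide-and-conquer reduction of the list of pairs.
def bGo (ts : List (Int × Int)) : Int × Int :=
  match ts with
  | [] => (1, 0)
  | [t] => t
  | a :: b :: rest =>
    let m := (a :: b :: rest).length / 2
    bCompose (bGo ((a :: b :: rest).take m)) (bGo ((a :: b :: rest).drop m))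
termination_by ts.length
decreasing_by
  all_goals simp [List.length_take, List.length_drop]; omega

def build_inverse_polynomial_alt (functions : List (Int × Int)) (N : Int) : Int × Int :=
  bGo (functions.map (bPair N))

-- ===== PRECONDITION & SPEC =====
-- Exactly where A returns: pow(f[1], -1, N) is only reached for type-1 entries and raises
-- ValueError when N = 0 or f[1] is not invertible mod N.
def Pre_build_inverse_polynomial (functions : List (Int × Int)) (N : Int) : Prop :=
  ∀ f ∈ functions, f.1 = 1 → N ≠ 0 ∧ Int.gcd f.2 N = 1
instance (functions : List (Int × Int)) (N : Int) : Decidable (Pre_build_inverse_polynomial functions N) := by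
  unfold Pre_build_inverse_polynomial; infer_instance

def pvWitness_build_inverse_polynomial : (List (Int × Int)) × Int := ([(0, 0), (1, 3), (2, -4)], 7)

def Spec_build_inverse_polynomial (functions : List (Int × Int)) (N : Int) (out : Int × Int) : Prop := out = build_inverse_polynomial_alt functions N
instance (functions : List (Int × Int)) (N : Int) (out : Int × Int) : Decidable (Spec_build_inverse_polynomial functions N out) := by unfold Spec_build_inverse_polynomial; infer_instance

-- ===== CLAIM (what is proved, stated in full; the proofs are below) =====
def Claim_equal_build_inverse_polynomial : Prop := ∀ (functions : List (Int × Int)) (N : Int), Dom_build_inverse_polynomial functions N → Pre_build_inverse_polynomial functions N → Spec_build_inverse_polynomial functions N (build_inverse_polynomial functions N)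

-- ===== LEMMAS AND PROOFS =====

theorem bCompose_assoc (p q r : Int × Int) : bCompose (bCompose p q) r = bCompose p (bCompose q r) := by
  simp [bCompose]; constructor <;> ring

theorem bCompose_one_left (p : Int × Int) : bCompose (1, 0) p = p := by
  simp [bCompose]

theorem bCompose_one_right (p : Int × Int) : bCompose p (1, 0) = p := by
  simp [bCompose]

theorem foldr_bCompose_append (l1 l2 : List (Int × Int)) :
    (l1 ++ l2).foldr bCompose (1, 0)
      = bCompose (l1.foldr bCompose (1, 0)) (l2.foldr bCompose (1, 0)) := by
  induction l1 with
  | nil => simp [bCompose_one_left]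
  | cons t l1 ih => simp [List.foldr_cons, ih, bCompose_assoc]

theorem bGo_eq_foldr (ts : List (Int × Int)) : bGo ts = ts.foldr bCompose (1, 0) := by
  induction ts using bGo.induct with
  | case1 => simp [bGo]
  | case2 t => simp [bGo, bCompose_one_right]
  | case3 a b rest m ih1 ih2 =>
    rw [bGo]
    simp only at ih1 ih2
    rw [ih1, ih2, ← foldr_bCompose_append, List.take_append_drop]

theorem stepA_eq (N : Int) (p f : Int × Int) :
    (let a := p.1
     let b := p.2
     if f.1 == 0 then (a * (-1), -1 - b)
     else if f.1 == 1 then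
       let inv := pymodinv f.2 N
       (a * inv, b * inv)
     else if f.1 == 2 then (a, b + f.2)
     else (a, b)) = bCompose (bPair N f) p := by
  simp only [bPair, bCompose]
  split_ifs <;> (simp; (try omega); (try exact ⟨mul_comm _ _, mul_comm _ _⟩))

theorem buildA_eq_foldr (functions : List (Int × Int)) (N : Int) :
    build_inverse_polynomial functions N
      = (functions.map (bPair N)).foldr bCompose (1, 0) := by
  unfold build_inverse_polynomial
  rw [PySem.List.slice?_none_none_neg_one]
  simp only [Option.getD_some, List.foldl_reverse]
  rw [List.foldr_map]
  congr 1
  funext f p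
  exact stepA_eq N p f

-- ===== VERDICT (by name: the statement is the Claim_ definition above) =====
theorem build_inverse_polynomial_spec : Claim_equal_build_inverse_polynomial := by
  intro functions N _ _
  unfold Spec_build_inverse_polynomial build_inverse_polynomial_alt
  rw [buildA_eq_foldr, bGo_eq_foldr]
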